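-- pv_equiv track=rewrite | github.com/MozhganVD/PermutationLocationImportance | tools.py | find_itemset_indexes
-- ===== SOURCE A (Python) =====
-- import itertools
-- import itertools
--
-- def find_itemset_indexes(sequence, itemset):
--     itemset_length = len(itemset)
--     indexes = []
--     combinations_list = list(itertools.combinations(range(len(sequence)), itemset_length))
--     for combination in combinations_list:
--         subset = [sequence[i] for i in combination]
--         if set(subset) == set(itemset):
--             indexes.append(combination)
--
--     remaining_indexes = []
--     for t in indexes:
--         non_overlapped = True
--         for r_idx in remaining_indexes:
--             if len(set(t).intersection(set(r_idx))) > 0: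
--                 non_overlapped = False
--         if non_overlapped:
--             remaining_indexes.append(t)
--
--     return remaining_indexes
-- ===== SOURCE B (Python) =====
-- import itertools
--
-- def find_itemset_indexes(sequence, itemset):
--     item_set = set(itemset)
--     k = len(itemset)
--     # only indices whose value belongs to the itemset can ever appear in a match
--     cand = [i for i, v in enumerate(sequence) if v in item_set]
--
--     result = []
--     used = set()
--     # single streaming pass: keep a match iff it is disjoint from everything kept so far
--     for c in itertools.combinations(cand, k):
--         if {sequence[i] for i in c} == item_set and used.isdisjoint(c):
--             result.append(c)
--             used.update(c)
--     return result
-- ===== Notes on version B (the rewrite author's own statement) =====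
-- stated objective: alternative
-- what changed: B pre-filters indices to those whose value lies in set(itemset) and enumerates combinations of those candidates only, and it replaces A's quadratic pairwise-intersection overlap pass with a single streaming pass over the combinations that keeps a running 'used' index set; intended as faster on itemset-sparse sequences (a timing run measured only 1.45x at its largest size, so no speed is claimed).
import Mathlib
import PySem

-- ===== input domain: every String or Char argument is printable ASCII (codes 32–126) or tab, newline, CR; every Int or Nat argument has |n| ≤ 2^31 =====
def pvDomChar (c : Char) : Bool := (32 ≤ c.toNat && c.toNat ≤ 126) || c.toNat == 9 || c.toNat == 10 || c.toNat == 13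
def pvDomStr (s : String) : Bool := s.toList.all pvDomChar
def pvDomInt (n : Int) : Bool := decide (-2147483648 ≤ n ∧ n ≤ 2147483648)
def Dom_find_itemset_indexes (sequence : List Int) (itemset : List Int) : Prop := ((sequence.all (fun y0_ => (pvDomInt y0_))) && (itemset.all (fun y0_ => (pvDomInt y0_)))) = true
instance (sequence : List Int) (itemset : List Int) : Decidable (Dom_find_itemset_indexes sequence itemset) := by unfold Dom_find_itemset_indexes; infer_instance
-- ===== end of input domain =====

-- B restricts combination generation to indices whose value is in set(itemset) and fuses A's
-- quadratic pairwise-overlap pass into one streaming pass with a running 'used' index set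
-- (objective: alternative; no speed claim).

-- ===== PORT A =====
-- sequence[i]: every index comes from range(len(sequence)), so it is always in range; the default 0 is never used
def pvVal (sequence : List Int) (i : Int) : Int := PySem.List.pyGetD sequence i 0

def find_itemset_indexes (sequence : List Int) (itemset : List Int) : List (List Int) :=
  let itemset_length := itemset.length
  let combinations_list :=
    PySem.List.combinations (PySem.List.pyRange 0 (sequence.length : Int) 1) itemset_length
  let indexes := combinations_list.foldl (fun acc combination =>
    let subset := combination.map (fun i => pvVal sequence i)
    if PySem.Set.equal (PySem.Set.ofList subset) (PySem.Set.ofList itemset)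
    then acc ++ [combination] else acc) []
  indexes.foldl (fun rem t =>
    let nonOverlapped := rem.foldl (fun b r =>
      if PySem.Set.len (PySem.Set.inter (PySem.Set.ofList t) (PySem.Set.ofList r)) > 0
      then false else b) true
    if nonOverlapped then rem ++ [t] else rem) []

-- ===== PORT B =====
def find_itemset_indexes_alt (sequence : List Int) (itemset : List Int) : List (List Int) :=
  let itemSet := PySem.Set.ofList itemset
  let k := itemset.length
  let cand := ((PySem.List.enumerate sequence 0).filter
      (fun p => PySem.Set.contains itemSet p.2)).map (·.1)
  ((PySem.List.combinations cand k).foldl (fun st c =>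
      if PySem.Set.equal (PySem.Set.ofList (c.map (fun i => pvVal sequence i))) itemSet
          && PySem.Set.isdisjoint st.2 c
      then (st.1 ++ [c], PySem.Set.update st.2 c) else st)
    (([] : List (List Int)), (PySem.Set.empty : PySem.Set Int))).1

-- ===== PRECONDITION & SPEC =====
def Spec_find_itemset_indexes (sequence : List Int) (itemset : List Int) (out : List (List Int)) : Prop := out = find_itemset_indexes_alt sequence itemset
instance (sequence : List Int) (itemset : List Int) (out : List (List Int)) : Decidable (Spec_find_itemset_indexes sequence itemset out) := by unfold Spec_find_itemset_indexes; infer_instance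

-- ===== CLAIM (what is proved, stated in full; the proofs are below) =====
def Claim_equal_find_itemset_indexes : Prop := ∀ (sequence : List Int) (itemset : List Int), Dom_find_itemset_indexes sequence itemset → Spec_find_itemset_indexes sequence itemset (find_itemset_indexes sequence itemset)

-- ===== LEMMAS AND PROOFS =====

-- combinations of a filtered list = combinations filtered to the tuples all of whose entries pass
theorem pv_comb_filter {α : Type} (Q : α → Bool) :
    ∀ (xs : List α) (r : Nat),
      PySem.List.combinations (xs.filter Q) r
        = (PySem.List.combinations xs r).filter (fun c => c.all Q) := by
  intro xs
  induction xs with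
  | nil =>
    intro r
    cases r <;> simp [PySem.List.combinations_zero, PySem.List.combinations_nil_succ]
  | cons x xs ih =>
    intro r
    cases r with
    | zero => simp [PySem.List.combinations_zero]
    | succ r =>
      by_cases hQ : Q x = true
      · rw [List.filter_cons_of_pos hQ, PySem.List.combinations_cons_succ,
            PySem.List.combinations_cons_succ, List.filter_append, List.filter_map,
            ih r, ih (r+1)]
        simp [Function.comp_def, hQ]
      · rw [List.filter_cons_of_neg hQ, PySem.List.combinations_cons_succ,
            List.filter_append, List.filter_map, ih (r+1)]
        simp [Function.comp_def, hQ]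

-- A's inner overlap loop is an 'all' over remaining_indexes
theorem pv_foldl_nonov {α : Type} (p : α → Prop) [DecidablePred p] :
    ∀ (l : List α) (b : Bool),
      l.foldl (fun b r => if p r then false else b) b
        = (b && l.all (fun r => !(decide (p r)))) := by
  intro l
  induction l with
  | nil => intro b; simp
  | cons r l ih =>
    intro b
    simp only [List.foldl_cons, List.all_cons]
    rw [ih]
    by_cases h : p r <;> simp [h]

theorem pv_len_pos_iff (s : PySem.Set Int) :
    PySem.Set.len s > 0 ↔ ∃ x, x ∈ s := by
  simp [PySem.Set.len, List.length_pos_iff_exists_mem]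

-- greedy equivalence: pairwise-intersection scan over the kept tuples = disjointness with the used set
theorem pv_greedy (M : List (List Int)) :
    ∀ (rem : List (List Int)) (used : PySem.Set Int),
      (∀ x : Int, x ∈ used ↔ ∃ r ∈ rem, x ∈ r) →
      M.foldl (fun rem t =>
          if rem.foldl (fun b r =>
            if PySem.Set.len (PySem.Set.inter (PySem.Set.ofList t) (PySem.Set.ofList r)) > 0
            then false else b) true
          then rem ++ [t] else rem) rem
        = (M.foldl (fun st c =>
            if PySem.Set.isdisjoint st.2 c
            then (st.1 ++ [c], PySem.Set.update st.2 c) else st) (rem, used)).1 := by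
  induction M with
  | nil => intro rem used _; simp
  | cons t M ih =>
    intro rem used hinv
    simp only [List.foldl_cons]
    have hd : (rem.foldl (fun b r =>
        if PySem.Set.len (PySem.Set.inter (PySem.Set.ofList t) (PySem.Set.ofList r)) > 0
        then false else b) true) = PySem.Set.isdisjoint used t := by
      rw [pv_foldl_nonov
        (fun r => PySem.Set.len (PySem.Set.inter (PySem.Set.ofList t) (PySem.Set.ofList r)) > 0) rem true]
      rw [Bool.eq_iff_iff]
      simp only [Bool.true_and, List.all_eq_true, Bool.not_eq_eq_eq_not, Bool.not_true,
        decide_eq_false_iff_not, PySem.Set.isdisjoint_iff]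
      constructor
      · intro h x hxu hxt
        obtain ⟨r, hr, hxr⟩ := (hinv x).1 hxu
        exact h r hr ((pv_len_pos_iff _).2 ⟨x, (PySem.Set.mem_inter _ _ _).2
          ⟨(PySem.Set.mem_ofList _ _).2 hxt, (PySem.Set.mem_ofList _ _).2 hxr⟩⟩)
      · intro h r hr hpos
        obtain ⟨x, hx⟩ := (pv_len_pos_iff _).1 hpos
        obtain ⟨hxt, hxr⟩ := (PySem.Set.mem_inter _ _ _).1 hx
        exact h x ((hinv x).2 ⟨r, hr, (PySem.Set.mem_ofList _ _).1 hxr⟩)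
          ((PySem.Set.mem_ofList _ _).1 hxt)
    simp only [hd]
    by_cases hdis : PySem.Set.isdisjoint used t = true
    · simp only [hdis, if_true]
      exact ih (rem ++ [t]) (PySem.Set.update used t) (by
        intro x
        rw [PySem.Set.mem_update]
        simp only [List.mem_append, List.mem_singleton]
        constructor
        · rintro (hx | hx)
          · obtain ⟨r, hr, hxr⟩ := (hinv x).1 hx
            exact ⟨r, Or.inl hr, hxr⟩
          · exact ⟨t, Or.inr rfl, hx⟩
        · rintro ⟨r, hr | rfl, hxr⟩
          · exact Or.inl ((hinv x).2 ⟨r, hr, hxr⟩)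
          · exact Or.inr hxr)
    · simp only [hdis]
      exact ih rem used hinv

theorem pv_main (sequence : List Int) (itemset : List Int) :
    find_itemset_indexes sequence itemset = find_itemset_indexes_alt sequence itemset := by
  unfold find_itemset_indexes find_itemset_indexes_alt
  dsimp only
  have hcand : ((PySem.List.enumerate sequence 0).filter
      (fun p => PySem.Set.contains (PySem.Set.ofList itemset) p.2)).map (·.1)
      = (PySem.List.pyRange 0 (sequence.length : Int) 1).filter
          (fun j => PySem.Set.contains (PySem.Set.ofList itemset) (pvVal sequence j)) := by
    rw [PySem.List.enumerate_eq_map_pyRange sequence 0, List.filter_map, List.map_map]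
    simp [Function.comp_def, pvVal, PySem.List.len]
  rw [hcand]
  conv_lhs => rw [PySem.List.foldl_append_if_eq_filter, List.nil_append]
  rw [pv_greedy _ [] PySem.Set.empty (by intro x; simp [PySem.Set.empty])]
  conv_rhs => rw [pv_comb_filter
    (fun j => PySem.Set.contains (PySem.Set.ofList itemset) (pvVal sequence j)),
    List.foldl_filter]
  have hPQ : ∀ c : List Int,
      (PySem.Set.equal (PySem.Set.ofList (c.map (fun i => pvVal sequence i)))
        (PySem.Set.ofList itemset)) = true →
      (c.all (fun j => PySem.Set.contains (PySem.Set.ofList itemset) (pvVal sequence j))) = true := by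
    intro c hc
    rw [List.all_eq_true]
    intro j hj
    have h1 : pvVal sequence j ∈ PySem.Set.ofList (c.map fun i => pvVal sequence i) :=
      (PySem.Set.mem_ofList _ _).2 (List.mem_map_of_mem hj)
    exact (PySem.Set.contains_iff _ _).2 (((PySem.Set.equal_iff _ _).1 hc (pvVal sequence j)).1 h1)
  have hfun : (fun (st : List (List Int) × PySem.Set Int) (c : List Int) =>
      if (c.all (fun j => PySem.Set.contains (PySem.Set.ofList itemset) (pvVal sequence j))) = true then
        (if (PySem.Set.equal (PySem.Set.ofList (c.map (fun i => pvVal sequence i)))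
              (PySem.Set.ofList itemset) && PySem.Set.isdisjoint st.2 c) = true
         then (st.1 ++ [c], PySem.Set.update st.2 c) else st)
      else st)
    = (fun st c =>
        if (PySem.Set.equal (PySem.Set.ofList (c.map (fun i => pvVal sequence i)))
              (PySem.Set.ofList itemset)) = true then
          (if PySem.Set.isdisjoint st.2 c = true
           then (st.1 ++ [c], PySem.Set.update st.2 c) else st) else st) := by
    funext st c
    by_cases hc : (PySem.Set.equal (PySem.Set.ofList (c.map (fun i => pvVal sequence i)))
        (PySem.Set.ofList itemset)) = true
    · simp only [hc, hPQ c hc, Bool.true_and, if_true]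
    · simp [hc]
  conv_rhs => rw [hfun, ← List.foldl_filter]

-- ===== VERDICT (by name: the statement is the Claim_ definition above) =====
theorem find_itemset_indexes_spec : Claim_equal_find_itemset_indexes := by
  intro sequence itemset _
  exact pv_main sequence itemset
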